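-- pv_equiv track=rewrite | github.com/deaconsham/badminton-skill-based-matchmaking | engine.py | _check_requests
-- ===== SOURCE A (Python) =====
-- def _opponent_reqs(p):
--     return [r for r in [p.get("requested_opponent1"), p.get("requested_opponent2")] if r]
--
-- def _check_requests(lobby):
--     lobby_ids = {p["player_doc_id"] for p in lobby}
--     for p in lobby:
--         req_tm = p.get("requested_teammate")
--         if req_tm and req_tm not in lobby_ids:
--             return False
--         for req_op in _opponent_reqs(p):
--             if req_op not in lobby_ids:
--                 return False
--     return True
-- ===== SOURCE B (Python) =====
-- def _check_requests(lobby):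
--     ids = sorted(p["player_doc_id"] for p in lobby)
--     reqs = sorted(r for p in lobby
--                   for r in (p.get("requested_teammate"),
--                             p.get("requested_opponent1"),
--                             p.get("requested_opponent2"))
--                   if r)
--     i = 0
--     for r in reqs:
--         while i < len(ids) and ids[i] < r:
--             i += 1
--         if i == len(ids) or ids[i] != r:
--             return False
--     return True
-- ===== Notes on version B (the rewrite author's own statement) =====
-- stated objective: alternative
-- what changed: B sorts the lobby ids and the truthy requested ids and verifies containment with a two-pointer merge over the two sorted lists, instead of A's early-return scan testing each request against a hash set.
import Mathlib
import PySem

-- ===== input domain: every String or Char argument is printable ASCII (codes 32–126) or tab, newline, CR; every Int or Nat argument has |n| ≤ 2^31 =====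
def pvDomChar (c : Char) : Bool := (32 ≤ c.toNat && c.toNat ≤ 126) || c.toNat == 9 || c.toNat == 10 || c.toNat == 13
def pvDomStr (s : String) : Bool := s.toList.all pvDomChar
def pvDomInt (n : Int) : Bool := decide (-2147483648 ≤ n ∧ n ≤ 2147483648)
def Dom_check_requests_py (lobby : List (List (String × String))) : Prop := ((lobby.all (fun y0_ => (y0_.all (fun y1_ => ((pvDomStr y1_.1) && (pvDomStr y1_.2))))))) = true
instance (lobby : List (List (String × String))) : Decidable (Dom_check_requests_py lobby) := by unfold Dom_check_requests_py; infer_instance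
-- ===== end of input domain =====

-- ===== PORT A =====
-- A mutates nothing; the proved equivalence is about the return value.
-- Port A: early-return scan over the lobby, testing each request against the set lobby_ids.
-- dict lookup p.get(k): first match in the association list
def pvGet (p : List (String × String)) (k : String) : Option String :=
  (PySem.Dict.mk p).get? k

-- _opponent_reqs(p): the two opponent requests, keeping only truthy (present and non-empty) ones
def pvOppReqs (p : List (String × String)) : List String :=
  ([pvGet p "requested_opponent1", pvGet p "requested_opponent2"].filterMap id).filter
    (fun r => r != "")

-- lobby_ids = {p["player_doc_id"] for p in lobby}; Pre_ guarantees the key is present, so getD "" never fires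
def pvLobbyIds (lobby : List (List (String × String))) : PySem.Set String :=
  PySem.Set.ofList (lobby.map (fun p => (pvGet p "player_doc_id").getD ""))

-- the for-loop of A with its early returns, as structural recursion
def pvCheckLoop (ids : PySem.Set String) : List (List (String × String)) → Bool
  | [] => true
  | p :: rest =>
    let tmOk : Bool := match pvGet p "requested_teammate" with
      | some t => t == "" || PySem.Set.contains ids t   -- "if req_tm and req_tm not in lobby_ids: return False"
      | none => true
    if !tmOk then false
    else if (pvOppReqs p).all (fun r => PySem.Set.contains ids r) then pvCheckLoop ids rest
    else false

def check_requests_py (lobby : List (List (String × String))) : Bool :=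
  pvCheckLoop (pvLobbyIds lobby) lobby

-- ===== PORT B =====
-- Port B: sort the lobby ids and the truthy requested ids, then a two-pointer merge containment test.
-- the three request fields of one player, filtered to truthy values (the genexp inside sorted(...))
def pvReqs3 (p : List (String × String)) : List String :=
  ([pvGet p "requested_teammate", pvGet p "requested_opponent1",
    pvGet p "requested_opponent2"].filterMap id).filter (fun r => r != "")

-- the two-pointer loop: 'for r in reqs: advance i while ids[i] < r; fail unless ids[i] == r'
-- (the pointer i is represented by the unconsumed suffix of ids)
def pvMerge : List String → List String → Bool
  | _, [] => true
  | [], _ :: _ => false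
  | a :: is, r :: rs =>
    if a < r then pvMerge is (r :: rs)
    else if a == r then pvMerge (a :: is) rs
    else false
termination_by is rs => (rs.length, is.length)

def check_requests_py_alt (lobby : List (List (String × String))) : Bool :=
  let ids := PySem.List.sorted (lobby.map (fun p => (pvGet p "player_doc_id").getD ""))
               (fun x => x) false
  let reqs := PySem.List.sorted (lobby.flatMap pvReqs3) (fun x => x) false
  pvMerge ids reqs

-- ===== PRECONDITION & SPEC =====
-- Pre_ excludes exactly the inputs where both programs raise KeyError: a lobby entry without the "player_doc_id" key.
def Pre_check_requests_py (lobby : List (List (String × String))) : Prop :=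
  ∀ p ∈ lobby, ((PySem.Dict.mk p).get? "player_doc_id").isSome
instance (lobby : List (List (String × String))) : Decidable (Pre_check_requests_py lobby) := by
  unfold Pre_check_requests_py; infer_instance

def pvWitness_check_requests_py : (List (List (String × String))) :=
  [[("player_doc_id", "a"), ("requested_teammate", "a")]]

def Spec_check_requests_py (lobby : List (List (String × String))) (out : Bool) : Prop :=
  out = check_requests_py_alt lobby
instance (lobby : List (List (String × String))) (out : Bool) : Decidable (Spec_check_requests_py lobby out) := by
  unfold Spec_check_requests_py; infer_instance

-- ===== CLAIM (what is proved, stated in full; the proofs are below) =====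
def Claim_equal_check_requests_py : Prop := ∀ (lobby : List (List (String × String))), Dom_check_requests_py lobby → Pre_check_requests_py lobby → Spec_check_requests_py lobby (check_requests_py lobby)

-- ===== LEMMAS AND PROOFS =====

-- all requested ids of one player as seen by A: the truthy teammate request plus the truthy opponent requests
def pvReqs (p : List (String × String)) : List String :=
  (match pvGet p "requested_teammate" with
   | some t => if t != "" then [t] else []
   | none => []) ++ pvOppReqs p

lemma mem_pvReqs3 (p : List (String × String)) (x : String) :
    x ∈ pvReqs3 p ↔ x ∈ pvReqs p := by
  unfold pvReqs3 pvReqs pvOppReqs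
  cases pvGet p "requested_teammate" with
  | none => simp
  | some t =>
    by_cases ht : t = "" <;> simp [ht]

-- A's loop unrolled into one clean conjunction per player
lemma loop_cons (ids : PySem.Set String) (p : List (String × String)) (rest : List (List (String × String))) :
    pvCheckLoop ids (p :: rest) =
      ((pvReqs p).all (fun r => PySem.Set.contains ids r) && pvCheckLoop ids rest) := by
  conv_lhs => rw [pvCheckLoop]
  generalize pvCheckLoop ids rest = b
  unfold pvReqs
  cases hg : pvGet p "requested_teammate" with
  | none => cases b <;> simp [List.decide_forall_mem]
  | some t =>
    by_cases ht : t = ""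
    · subst ht
      cases b <;> simp [List.decide_forall_mem]
    · cases b <;> simp [ht, List.decide_forall_mem]

lemma loop_iff (ids : PySem.Set String) (l : List (List (String × String))) :
    pvCheckLoop ids l = true ↔ ∀ p ∈ l, ∀ r ∈ pvReqs p, r ∈ ids := by
  induction l with
  | nil => simp [pvCheckLoop]
  | cons p rest ih =>
    rw [loop_cons]
    simp [List.all_eq_true, ih]

-- the merge test on two ≤-sorted lists is exactly "every request occurs among the ids"
lemma merge_iff (ids reqs : List String) (hi : ids.Pairwise (· ≤ ·)) (hr : reqs.Pairwise (· ≤ ·)) :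
    pvMerge ids reqs = true ↔ ∀ r ∈ reqs, r ∈ ids := by
  induction ids, reqs using pvMerge.induct with
  | case1 ids => simp [pvMerge]
  | case2 r rs =>
    rw [pvMerge]
    simp only [Bool.false_eq_true, false_iff]
    intro h
    exact absurd (h r List.mem_cons_self) List.not_mem_nil
  | case3 a is r rs hlt ih =>
    rw [pvMerge, if_pos hlt]
    have hne : ∀ x ∈ r :: rs, x ≠ a := by
      intro x hx
      rcases List.mem_cons.mp hx with rfl | hx'
      · exact (ne_of_gt hlt)
      · exact ne_of_gt (lt_of_lt_of_le hlt ((List.pairwise_cons.mp hr).1 x hx'))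
    rw [ih (List.pairwise_cons.mp hi).2 hr]
    constructor
    · intro h x hx; exact List.mem_cons_of_mem _ (h x hx)
    · intro h x hx
      rcases List.mem_cons.mp (h x hx) with h' | h'
      · exact absurd h' (hne x hx)
      · exact h'
  | case4 a is r rs hlt heq ih =>
    have hae : a = r := by simpa using heq
    rw [pvMerge, if_neg hlt, if_pos heq]
    rw [ih hi (List.pairwise_cons.mp hr).2]
    constructor
    · intro h x hx
      rcases List.mem_cons.mp hx with rfl | hx'
      · exact List.mem_cons.mpr (Or.inl hae.symm)
      · exact h x hx'
    · intro h x hx; exact h x (List.mem_cons_of_mem _ hx)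
  | case5 a is r rs hlt heq =>
    have hane : a ≠ r := by simpa using heq
    have hra : r < a := lt_of_le_of_ne (le_of_not_gt hlt) (Ne.symm hane)
    rw [pvMerge, if_neg hlt, if_neg heq]
    simp only [Bool.false_eq_true, false_iff]
    intro h
    have := h r List.mem_cons_self
    rcases List.mem_cons.mp this with h' | h'
    · exact hane h'.symm
    · exact absurd ((List.pairwise_cons.mp hi).1 r h') (not_le.mpr hra)

lemma alt_iff (lobby : List (List (String × String))) :
    check_requests_py_alt lobby = true ↔ ∀ p ∈ lobby, ∀ r ∈ pvReqs p, r ∈ pvLobbyIds lobby := by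
  unfold check_requests_py_alt
  rw [merge_iff _ _ (PySem.List.sorted_pairwise _ _) (PySem.List.sorted_pairwise _ _)]
  constructor
  · intro h p hp r hr
    have hr' : r ∈ PySem.List.sorted (lobby.flatMap pvReqs3) (fun x => x) false := by
      rw [PySem.List.mem_sorted]
      exact List.mem_flatMap.mpr ⟨p, hp, (mem_pvReqs3 p r).mpr hr⟩
    have := h r hr'
    rw [PySem.List.mem_sorted] at this
    unfold pvLobbyIds
    rw [PySem.Set.mem_ofList]
    exact this
  · intro h r hr
    rw [PySem.List.mem_sorted] at hr
    rcases List.mem_flatMap.mp hr with ⟨p, hp, hx⟩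
    have := h p hp r ((mem_pvReqs3 p r).mp hx)
    unfold pvLobbyIds at this
    rw [PySem.Set.mem_ofList] at this
    rw [PySem.List.mem_sorted]
    exact this

-- ===== VERDICT (by name: the statement is the Claim_ definition above) =====
theorem check_requests_py_spec : Claim_equal_check_requests_py := by
  intro lobby _ _
  unfold Spec_check_requests_py check_requests_py
  have hA := loop_iff (pvLobbyIds lobby) lobby
  have hB := alt_iff lobby
  cases hcl : pvCheckLoop (pvLobbyIds lobby) lobby
  · cases halt : check_requests_py_alt lobby
    · rfl
    · exact absurd (hA.mpr (hB.mp halt)) (by simp [hcl])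
  · exact (hB.mpr (hA.mp hcl)).symm
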